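-- pv_equiv track=rewrite | github.com/Mike-Lalonde/python-algorithms-games-text-analytics | decoder.py | first_mate
-- ===== SOURCE A (Python) =====
-- def first_mate(line):
--     chest = []
--     piece_o_eight = ""
--     # Itterates through the text handed to it and looks at conditions
--     for rune in line:
--         # checks to see if input is alphanumerical or apostrophies
--         if rune.isalnum() or rune == "'":
--             piece_o_eight += rune
--         else:
--             if piece_o_eight != "":
--                 chest.append(piece_o_eight.lower())
--                 piece_o_eight = ""
--     if piece_o_eight != "":
--         chest.append(piece_o_eight.lower())
--     return chest
-- ===== SOURCE B (Python) =====
-- def first_mate(line):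
--     cleaned = ''.join(c if c.isalnum() or c == "'" else ' ' for c in line)
--     return cleaned.lower().split()
-- ===== Notes on version B (the rewrite author's own statement) =====
-- stated objective: idiomatic
-- what changed: Replaces the manual accumulator/flush loop by mapping every non-word character to a space and delegating tokenization to str.split(), lowering the whole line at once.
import Mathlib
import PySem

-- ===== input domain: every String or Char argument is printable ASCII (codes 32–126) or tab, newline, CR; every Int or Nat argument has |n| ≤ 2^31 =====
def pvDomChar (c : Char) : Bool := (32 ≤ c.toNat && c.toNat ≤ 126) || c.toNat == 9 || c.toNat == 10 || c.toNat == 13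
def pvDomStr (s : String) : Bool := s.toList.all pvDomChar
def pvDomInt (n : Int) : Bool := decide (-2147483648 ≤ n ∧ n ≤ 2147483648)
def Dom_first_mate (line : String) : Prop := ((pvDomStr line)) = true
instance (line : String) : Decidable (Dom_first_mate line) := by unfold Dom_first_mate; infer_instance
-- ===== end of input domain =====

-- B replaces A's manual accumulator/flush loop by mapping non-word characters to spaces and
-- delegating tokenization to str.split() after lowering the whole line (idiomatic, same cost).

-- ===== PORT A =====
-- the predicate `rune.isalnum() or rune == "'"` that both Pythons use verbatim
def isWordChar (c : Char) : Bool := PySem.Chars.isalnum c || c == '\''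

-- the body of A's for-loop (state: (chest, piece_o_eight), the string held as its chars)
def firstMateStep (st : List String × List Char) (rune : Char) : List String × List Char :=
  if isWordChar rune then (st.1, st.2 ++ [rune])
  else if st.2 ≠ [] then (st.1 ++ [String.ofList (PySem.Chars.lower st.2)], []) else st

-- A's trailing `if piece_o_eight != "": chest.append(piece_o_eight.lower())`
def firstMateFlush (st : List String × List Char) : List String :=
  if st.2 ≠ [] then st.1 ++ [String.ofList (PySem.Chars.lower st.2)] else st.1

def first_mate (line : String) : List String :=
  firstMateFlush (line.toList.foldl firstMateStep ([], []))

-- ===== PORT B =====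
def first_mate_alt (line : String) : List String :=
  let cleaned := String.ofList (line.toList.map (fun c => if isWordChar c then c else ' '))
  PySem.Str.split₀ (PySem.Str.lower cleaned)

-- ===== PRECONDITION & SPEC =====
def Spec_first_mate (line : String) (out : List String) : Prop := out = first_mate_alt line
instance (line : String) (out : List String) : Decidable (Spec_first_mate line out) := by unfold Spec_first_mate; infer_instance

-- ===== CLAIM (what is proved, stated in full; the proofs are below) =====
def Claim_equal_first_mate : Prop := ∀ (line : String), Dom_first_mate line → Spec_first_mate line (first_mate line)

-- ===== LEMMAS AND PROOFS =====

-- reference tokenizer over already-replaced characters (spaces as separators)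
def tokC : List Char → List Char → List (List Char)
  | cur, [] => if cur = [] then [] else [cur]
  | cur, d :: ds =>
    if PySem.Chars.isspace d then
      if cur = [] then tokC [] ds else cur :: tokC [] ds
    else tokC (cur ++ [d]) ds

-- reference tokenizer matching A's loop (piece held un-lowered, lowered at flush)
def tokA : List Char → List Char → List String
  | piece, [] => if piece = [] then [] else [String.ofList (PySem.Chars.lower piece)]
  | piece, c :: cs =>
    if isWordChar c then tokA (piece ++ [c]) cs
    else if piece = [] then tokA [] cs else String.ofList (PySem.Chars.lower piece) :: tokA [] cs

lemma isspace_false_of (c : Char) (h1 : 33 ≤ c.toNat) (h2 : c.toNat ≤ 126) :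
    PySem.Chars.isspace c = false := by
  simp only [PySem.Chars.isspace, Bool.or_eq_false_iff, Bool.and_eq_false_iff,
    decide_eq_false_iff_not]
  omega

lemma lowerChar_word_not_space (c : Char) (h : isWordChar c = true) :
    PySem.Chars.isspace (PySem.Chars.lowerChar c) = false := by
  simp only [isWordChar, PySem.Chars.isalnum, PySem.Chars.isalpha, PySem.Chars.isdigit,
    Bool.or_eq_true, Bool.and_eq_true, decide_eq_true_eq, beq_iff_eq] at h
  unfold PySem.Chars.lowerChar
  by_cases hu : PySem.Chars.isupper c = true
  · rw [if_pos hu]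
    simp only [PySem.Chars.isupper, Bool.and_eq_true, decide_eq_true_eq] at hu
    have h1 : 65 ≤ c.toNat := UInt32.le_iff_toNat_le.mp (Char.le_def.mp hu.1)
    have h2 : c.toNat ≤ 90 := UInt32.le_iff_toNat_le.mp (Char.le_def.mp hu.2)
    have hv : (Char.ofNat (c.toNat + 32)).toNat = c.toNat + 32 := by
      unfold Char.ofNat
      rw [dif_pos (Or.inl (by omega))]
      rfl
    apply isspace_false_of <;> omega
  · rw [if_neg hu]
    rcases h with (⟨hup | hlo⟩ | hd) | hq
    · exact absurd hup hu
    · simp only [PySem.Chars.islower, Bool.and_eq_true, decide_eq_true_eq] at hlo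
      have h1 : 97 ≤ c.toNat := UInt32.le_iff_toNat_le.mp (Char.le_def.mp hlo.1)
      have h2 : c.toNat ≤ 122 := UInt32.le_iff_toNat_le.mp (Char.le_def.mp hlo.2)
      apply isspace_false_of <;> omega
    · have h1 : 48 ≤ c.toNat := UInt32.le_iff_toNat_le.mp (Char.le_def.mp hd.1)
      have h2 : c.toNat ≤ 57 := UInt32.le_iff_toNat_le.mp (Char.le_def.mp hd.2)
      apply isspace_false_of <;> omega
    · subst hq; decide

lemma go_eq_tokC : ∀ (ds cur : List Char) (acc : List (List Char)),
    PySem.Chars.split₀.go ds cur acc = acc.reverse ++ tokC cur.reverse ds := by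
  intro ds
  induction ds with
  | nil =>
    intro cur acc
    simp only [PySem.Chars.split₀.go, tokC]
    by_cases hc : cur = []
    · simp [hc]
    · simp [hc, List.isEmpty_iff]
  | cons d ds ih =>
    intro cur acc
    simp only [PySem.Chars.split₀.go]
    by_cases hs : PySem.Chars.isspace d
    · rw [if_pos hs]
      by_cases hc : cur = []
      · subst hc
        simpa [tokC, hs] using ih [] acc
      · rw [if_neg (by simp [List.isEmpty_iff, hc])]
        rw [ih [] (cur.reverse :: acc)]
        simp [tokC, hs, hc]
    · rw [if_neg hs, ih (d :: cur) acc]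
      simp [tokC, hs]

lemma split₀_eq_tokC (ds : List Char) : PySem.Chars.split₀ ds = tokC [] ds := by
  simpa [PySem.Chars.split₀] using go_eq_tokC ds [] []

lemma tokA_eq_tokC : ∀ (cs piece : List Char),
    (∀ c ∈ cs, isWordChar c = true → PySem.Chars.isspace (PySem.Chars.lowerChar c) = false) →
    tokA piece cs
      = (tokC (PySem.Chars.lower piece)
          (cs.map (fun c => PySem.Chars.lowerChar (if isWordChar c then c else ' ')))).map String.ofList := by
  intro cs
  induction cs with
  | nil =>
    intro piece _
    by_cases hp : piece = [] <;>
      simp [tokA, tokC, hp, PySem.Chars.lower]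
  | cons c cs ih =>
    intro piece h
    have htl : ∀ x ∈ cs, isWordChar x = true → PySem.Chars.isspace (PySem.Chars.lowerChar x) = false :=
      fun x hx => h x (List.mem_cons_of_mem _ hx)
    by_cases hw : isWordChar c
    · have hns := h c (List.mem_cons_self ..) hw
      simp only [tokA, hw, if_true, List.map_cons, tokC, hns, Bool.false_eq_true, if_false]
      rw [ih (piece ++ [c]) htl]
      simp [PySem.Chars.lower]
    · have hsp : PySem.Chars.isspace (PySem.Chars.lowerChar ' ') = true := by decide
      simp only [tokA, hw, Bool.false_eq_true, if_false, List.map_cons, tokC, hsp, if_true]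
      by_cases hp : piece = []
      · simp only [hp, PySem.Chars.lower, List.map_nil, if_true]
        simpa [PySem.Chars.lower] using ih [] htl
      · have hlp : PySem.Chars.lower piece ≠ [] := by
          simp [PySem.Chars.lower, hp]
        rw [if_neg hp, if_neg hlp]
        have := ih [] htl
        simp only [PySem.Chars.lower, List.map_nil] at this
        simp [this, PySem.Chars.lower]

lemma foldl_eq_tokA : ∀ (cs : List Char) (chest : List String) (piece : List Char),
    firstMateFlush (cs.foldl firstMateStep (chest, piece)) = chest ++ tokA piece cs := by
  intro cs
  induction cs with
  | nil =>
    intro chest piece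
    by_cases hp : piece = [] <;> simp [firstMateFlush, tokA, hp]
  | cons c cs ih =>
    intro chest piece
    by_cases hw : isWordChar c
    · rw [List.foldl_cons]
      rw [show firstMateStep (chest, piece) c = (chest, piece ++ [c]) by
        simp [firstMateStep, hw]]
      rw [ih chest (piece ++ [c])]
      simp [tokA, hw]
    · by_cases hp : piece = []
      · rw [List.foldl_cons]
        rw [show firstMateStep (chest, piece) c = (chest, []) by
          simp [firstMateStep, hw, hp]]
        rw [ih chest []]
        simp [tokA, hw, hp]
      · rw [List.foldl_cons]
        rw [show firstMateStep (chest, piece) c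
            = (chest ++ [String.ofList (PySem.Chars.lower piece)], []) by
          simp [firstMateStep, hw, hp]]
        rw [ih (chest ++ [String.ofList (PySem.Chars.lower piece)]) []]
        simp [tokA, hw, hp]

-- ===== VERDICT (by name: the statement is the Claim_ definition above) =====
theorem first_mate_spec : Claim_equal_first_mate := by
  intro line _
  unfold Spec_first_mate first_mate first_mate_alt
  have hns : ∀ c ∈ line.toList, isWordChar c = true →
      PySem.Chars.isspace (PySem.Chars.lowerChar c) = false :=
    fun c _ hw => lowerChar_word_not_space c hw
  rw [foldl_eq_tokA line.toList [] [], tokA_eq_tokC _ [] hns]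
  simp only [PySem.Str.split₀, PySem.Str.lower]
  rw [show (String.ofList (PySem.Chars.lower
        (String.ofList (line.toList.map (fun c => if isWordChar c then c else ' '))).toList)).toList
      = line.toList.map (fun c => PySem.Chars.lowerChar (if isWordChar c then c else ' ')) by
    simp [PySem.Chars.lower, List.map_map, Function.comp]]
  rw [split₀_eq_tokC]
  simp [PySem.Chars.lower]
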